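-- pv_equiv track=rewrite | github.com/CESARIUX2596/Escenarioinator | escenarinator2_0.py | baseinator
-- ===== SOURCE A (Python) =====
-- def flicker(bool_value):
--     flick = not bool_value
--     return flick
--
-- def baseinator(amount):
--     if amount == 1:
--         return 1
--     elif amount == 2:
--         return 2
--     else:
--         status = False
--         counter = 0
--         for i in range(1, amount+1):
--             status = flicker(status)
--             if status == True:
--                 counter += 1
--             elif ((i == amount) and (status == False)):
--                 counter += 1
--     return counter
-- ===== SOURCE B (Python) =====
-- def baseinator(amount):
--     if amount <= 0:
--         return 0
--     if amount % 2 == 0: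
--         return amount // 2 + 1
--     return (amount + 1) // 2
-- ===== Notes on version B (the rewrite author's own statement) =====
-- stated objective: faster
-- what changed: Replaced the O(n) toggle-and-count loop by a closed-form parity formula: ceil(n/2) plus 1 when n is even (0 for n <= 0).
import Mathlib
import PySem

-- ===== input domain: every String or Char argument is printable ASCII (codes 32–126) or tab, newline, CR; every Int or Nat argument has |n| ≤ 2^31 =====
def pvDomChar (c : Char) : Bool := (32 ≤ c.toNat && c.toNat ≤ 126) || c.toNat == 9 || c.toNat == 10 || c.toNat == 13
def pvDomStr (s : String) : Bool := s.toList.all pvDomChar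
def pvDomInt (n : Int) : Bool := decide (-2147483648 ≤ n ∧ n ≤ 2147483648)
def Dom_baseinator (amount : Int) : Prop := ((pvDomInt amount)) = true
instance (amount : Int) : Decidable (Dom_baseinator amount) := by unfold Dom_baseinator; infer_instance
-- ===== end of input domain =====

-- B replaces A's O(n) toggle-and-count loop by a closed-form parity formula (asymptotically faster).


-- ===== PORT A =====
def flicker (bool_value : Bool) : Bool := !bool_value

def baseinatorStep (amount : Int) (sc : Bool × Int) (i : Int) : Bool × Int :=
  let status := flicker sc.1
  if status = true then (status, sc.2 + 1)
  else if i = amount ∧ status = false then (status, sc.2 + 1)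
  else (status, sc.2)

def baseinator (amount : Int) : Int :=
  if amount = 1 then 1
  else if amount = 2 then 2
  else
    ((PySem.List.pyRange 1 (amount + 1) 1).foldl (baseinatorStep amount) (false, 0)).2

-- ===== PORT B =====
def baseinator_alt (amount : Int) : Int :=
  if amount ≤ 0 then 0
  else if PySem.Int.mod amount 2 = 0 then PySem.Int.floordiv amount 2 + 1
  else PySem.Int.floordiv (amount + 1) 2

-- ===== PRECONDITION & SPEC =====
def Spec_baseinator (amount : Int) (out : Int) : Prop := out = baseinator_alt amount
instance (amount : Int) (out : Int) : Decidable (Spec_baseinator amount out) := by unfold Spec_baseinator; infer_instance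

-- ===== CLAIM (what is proved, stated in full; the proofs are below) =====
def Claim_equal_baseinator : Prop := ∀ (amount : Int), Dom_baseinator amount → Spec_baseinator amount (baseinator amount)

-- ===== LEMMAS AND PROOFS =====

-- The loop over 1..k (all strictly below `amount`) ends with status = parity of k
-- and counter = ⌈k/2⌉.
theorem baseinator_loop_prefix (amount : Int) (k : Nat) (hk : (k : Int) < amount) :
    (PySem.List.pyRange 1 ((k : Int) + 1) 1).foldl (baseinatorStep amount) (false, 0)
      = (decide (k % 2 = 1), (((k + 1) / 2 : Nat) : Int)) := by
  induction k with
  | zero =>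
      rw [show ((0 : Nat) : Int) + 1 = 1 by norm_num, PySem.List.pyRange_one_eq_nil le_rfl]
      simp
  | succ n ih =>
      have h1 : (1 : Int) ≤ (n : Int) + 1 := by omega
      rw [show ((n + 1 : Nat) : Int) + 1 = ((n : Int) + 1) + 1 by push_cast; ring,
          PySem.List.pyRange_one_succ_right h1, List.foldl_append,
          ih (by omega)]
      simp only [List.foldl_cons, List.foldl_nil, baseinatorStep, flicker]
      rcases Nat.even_or_odd n with he | ho
      · have h2 : n % 2 = 0 := Nat.even_iff.mp he
        have h3 : (n + 1) % 2 = 1 := by omega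
        simp [h2, h3]
        omega
      · have h2 : n % 2 = 1 := Nat.odd_iff.mp ho
        have h3 : (n + 1) % 2 = 0 := by omega
        have hne : ((n : Int) + 1) ≠ amount := by omega
        simp [h2, h3, hne]
        omega

theorem baseinator_spec_pos (amount : Int) (h1 : 1 ≤ amount) :
    baseinator amount = baseinator_alt amount := by
  have hmod : PySem.Int.mod amount 2 = amount % 2 :=
    PySem.Int.mod_eq_emod_of_pos (by omega)
  have hd1 : PySem.Int.floordiv amount 2 = amount / 2 :=
    PySem.Int.floordiv_eq_ediv_of_pos (by omega)
  have hd2 : PySem.Int.floordiv (amount + 1) 2 = (amount + 1) / 2 :=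
    PySem.Int.floordiv_eq_ediv_of_pos (by omega)
  by_cases e1 : amount = 1
  · subst e1; decide
  by_cases e2 : amount = 2
  · subst e2; decide
  -- amount ≥ 3; run the loop
  have h3 : 3 ≤ amount := by omega
  -- write amount = (n+1 : Nat) with n = amount - 1
  obtain ⟨m, hm⟩ : ∃ m : Nat, amount = (m : Int) + 1 := ⟨(amount - 1).toNat, by omega⟩
  have hsplit : PySem.List.pyRange 1 (amount + 1) 1
      = PySem.List.pyRange 1 ((m : Int) + 1) 1 ++ [amount] := by
    rw [hm]
    exact PySem.List.pyRange_one_succ_right (by omega)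
  rw [baseinator, if_neg e1, if_neg e2, hsplit, List.foldl_append,
      baseinator_loop_prefix amount m (by omega)]
  simp only [List.foldl_cons, List.foldl_nil, baseinatorStep, flicker]
  rcases Nat.even_or_odd m with he | ho
  · -- m even, amount odd
    have h2 : m % 2 = 0 := Nat.even_iff.mp he
    have hmodv : amount % 2 = 1 := by omega
    simp only [baseinator_alt, if_neg (by omega : ¬ amount ≤ 0), hmod, hmodv,
      if_neg (by omega : (1:Int) ≠ 0), hd2]
    simp [h2]
    omega
  · -- m odd, amount even
    have h2 : m % 2 = 1 := Nat.odd_iff.mp ho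
    have hmodv : amount % 2 = 0 := by omega
    simp only [baseinator_alt, if_neg (by omega : ¬ amount ≤ 0), hmod, hmodv,
      hd1]
    simp [h2]
    omega

theorem baseinator_spec_nonpos (amount : Int) (h : amount ≤ 0) :
    baseinator amount = baseinator_alt amount := by
  have hnil : PySem.List.pyRange 1 (amount + 1) 1 = [] :=
    PySem.List.pyRange_one_eq_nil (by omega)
  rw [baseinator, if_neg (by omega : ¬ amount = 1), if_neg (by omega : ¬ amount = 2), hnil]
  simp [baseinator_alt, h]

-- ===== VERDICT (by name: the statement is the Claim_ definition above) =====
theorem baseinator_spec : Claim_equal_baseinator := by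
  intro amount _
  unfold Spec_baseinator
  by_cases h : amount ≤ 0
  · exact baseinator_spec_nonpos amount h
  · exact baseinator_spec_pos amount (by omega)
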